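-- pv_equiv track=rewrite | github.com/smenon8/MSApriori | script/MSApriori.py | applySplConditions
-- ===== SOURCE A (Python) =====
-- def genSubsets(l):
--     powerSetSize = 2 ** len(l)
--     powerSet = []
--     for i in range(1,powerSetSize):
--         tempEle = []
--         for j in range(len(l)):
--             binFlagInd = i & (1 << j)
--             if binFlagInd:
--                 tempEle.append(l[j])
--         powerSet.append(tempEle)
--     return powerSet
--
-- def applySplConditions(a,cannot_be_together,must_have):
--     ss = genSubsets(cannot_be_together)
--     ss = list(filter(lambda x : len(x)==2,ss))
--
--     ssTups = []
--     for row in ss: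
--         temp = []
--         for item in row:
--             temp.append(tuple([item]))
--         ssTups.append(tuple(temp))
--
--     filtPatt = []
--     for sel in a:
--         appendFlag = True
--         for sub in ssTups:
--             if sub[0] in sel and sub[1] in sel:
--                 appendFlag = False
--         if appendFlag:
--             filtPatt.append(sel)
--
--     mustHavTups = []
--     for item in must_have:
--         mustHavTups.append(tuple([item]))
--
--     finalAns = []
--     for item in filtPatt:
--         appendFlag = False
--         for musts in mustHavTups:
--             if len(item) == 1 and item == musts:
--                 appendFlag = True
--             else:
--                 if musts in item:
--                     appendFlag = True
--         if appendFlag: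
--             finalAns.append(item)
--
--     return finalAns
-- ===== SOURCE B (Python) =====
-- from itertools import combinations
--
-- def applySplConditions(a, cannot_be_together, must_have):
--     pairs = list(combinations(cannot_be_together, 2))
--     return [sel for sel in a
--             if not any((x,) in sel and (y,) in sel for x, y in pairs)
--             and any((m,) in sel for m in must_have)]
-- ===== Notes on version B (the rewrite author's own statement) =====
-- stated objective: faster
-- what changed: B generates only the size-2 index pairs of cannot_be_together directly (itertools.combinations) instead of enumerating the full 2^n power set and filtering for length 2, and does one filtering pass over a with two any() conditions instead of two separate flag-loops building intermediate lists.
import Mathlib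
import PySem

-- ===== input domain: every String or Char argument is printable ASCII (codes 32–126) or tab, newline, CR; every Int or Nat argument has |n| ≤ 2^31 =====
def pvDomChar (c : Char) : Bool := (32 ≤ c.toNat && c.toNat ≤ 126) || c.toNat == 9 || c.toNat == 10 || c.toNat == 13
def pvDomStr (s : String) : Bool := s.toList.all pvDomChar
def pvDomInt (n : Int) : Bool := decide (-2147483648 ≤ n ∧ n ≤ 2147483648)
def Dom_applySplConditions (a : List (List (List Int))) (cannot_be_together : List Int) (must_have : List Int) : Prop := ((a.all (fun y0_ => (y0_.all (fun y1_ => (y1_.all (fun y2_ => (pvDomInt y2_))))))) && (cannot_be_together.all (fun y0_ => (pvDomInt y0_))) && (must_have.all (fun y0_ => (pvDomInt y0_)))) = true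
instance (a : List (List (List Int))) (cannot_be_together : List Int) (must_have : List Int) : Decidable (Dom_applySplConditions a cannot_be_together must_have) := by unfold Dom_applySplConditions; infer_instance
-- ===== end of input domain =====

-- B replaces A's full 2^n power-set enumeration (filtered down to size 2) by direct generation of
-- the size-2 combinations, and fuses A's two flag-loop passes into one filtering pass: faster (asymptotic).

-- ===== PORT A =====
-- powerset of l via bitmasks i = 1 .. 2^len-1 (loop counters are nonnegative, so Nat is exact;
-- l[j] with j < len l is in range, so getD is exact)
def genSubsets (l : List Int) : List (List Int) :=
  ((List.range (2 ^ l.length)).drop 1).foldl (fun powerSet i =>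
    powerSet ++ [(List.range l.length).foldl (fun tempEle j =>
      if i &&& (1 <<< j) ≠ 0 then tempEle ++ [l.getD j 0] else tempEle) []]) []

def applySplConditions (a : List (List (List Int))) (cannot_be_together : List Int) (must_have : List Int) : List (List (List Int)) :=
  let ss := (genSubsets cannot_be_together).filter (fun x => x.length == 2)
  let ssTups : List (List (List Int)) :=
    ss.foldl (fun acc row => acc ++ [row.foldl (fun temp item => temp ++ [[item]]) []]) []
  let filtPatt := a.foldl (fun filtPatt sel =>
      let appendFlag := ssTups.foldl (fun flag sub =>
          if sub.getD 0 [] ∈ sel ∧ sub.getD 1 [] ∈ sel then false else flag) true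
      if appendFlag then filtPatt ++ [sel] else filtPatt) []
  let mustHavTups : List (List Int) := must_have.foldl (fun acc item => acc ++ [[item]]) []
  let finalAns := filtPatt.foldl (fun finalAns item =>
      let appendFlag := mustHavTups.foldl (fun flag musts =>
          -- Python `len(item)==1 and item == musts` compares a list with a tuple: `==` is always False
          if item.length = 1 ∧ False then true
          else if musts ∈ item then true else flag) false
      if appendFlag then finalAns ++ [item] else finalAns) []
  finalAns

-- ===== PORT B =====
-- itertools.combinations(l, 2) in order
def combinations2 (l : List Int) : List (Int × Int) :=
  match l with
  | [] => []
  | x :: xs => xs.map (fun y => (x, y)) ++ combinations2 xs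

def applySplConditions_alt (a : List (List (List Int))) (cannot_be_together : List Int) (must_have : List Int) : List (List (List Int)) :=
  let pairs := combinations2 cannot_be_together
  a.filter (fun sel =>
    !(pairs.any (fun p => sel.contains [p.1] && sel.contains [p.2])) &&
    must_have.any (fun m => sel.contains [m]))

-- ===== PRECONDITION & SPEC =====
def Spec_applySplConditions (a : List (List (List Int))) (cannot_be_together : List Int) (must_have : List Int) (out : List (List (List Int))) : Prop := out = applySplConditions_alt a cannot_be_together must_have
instance (a : List (List (List Int))) (cannot_be_together : List Int) (must_have : List Int) (out : List (List (List Int))) : Decidable (Spec_applySplConditions a cannot_be_together must_have out) := by unfold Spec_applySplConditions; infer_instance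

-- ===== CLAIM (what is proved, stated in full; the proofs are below) =====
def Claim_equal_applySplConditions : Prop := ∀ (a : List (List (List Int))) (cannot_be_together : List Int) (must_have : List Int), Dom_applySplConditions a cannot_be_together must_have → Spec_applySplConditions a cannot_be_together must_have (applySplConditions a cannot_be_together must_have)

-- ===== LEMMAS AND PROOFS =====

-- the inner bitmask loop of genSubsets, as a named function
def pvMask (l : List Int) (i : Nat) : List Int :=
  (List.range l.length).foldl (fun tempEle j =>
    if i &&& (1 <<< j) ≠ 0 then tempEle ++ [l.getD j 0] else tempEle) []

-- the full powerset map, including mask 0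
def pvM (l : List Int) : List (List Int) :=
  (List.range (2 ^ l.length)).map (pvMask l)

-- guarded append loop with a Prop guard and a map (the Bool-guard version is PySem.List.foldl_append_if)
theorem pv_foldl_filtmap {α β : Type} (p : α → Prop) [DecidablePred p] (g : α → β)
    (l : List α) (init : List β) :
    l.foldl (fun acc x => if p x then acc ++ [g x] else acc) init
      = init ++ ((l.filter (fun x => decide (p x))).map g) := by
  induction l generalizing init with
  | nil => simp
  | cons x xs ih =>
    by_cases h : p x <;> simp [h, ih]

theorem pvMask_eq (l : List Int) (i : Nat) :
    pvMask l i = ((List.range l.length).filter (fun j => decide (i &&& (1 <<< j) ≠ 0))).map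
      (fun j => l.getD j 0) :=
  (pv_foldl_filtmap (fun j => i &&& (1 <<< j) ≠ 0) (fun j => l.getD j 0)
    (List.range l.length) []).trans (List.nil_append _)

theorem pv_bit_succ (i j : Nat) : (i &&& (1 <<< (j+1)) ≠ 0) ↔ (i / 2 &&& (1 <<< j) ≠ 0) := by
  simp [Nat.one_shiftLeft, Nat.and_two_pow]
  exact Nat.testBit_add_one i j

theorem pvMask_cons (x : Int) (xs : List Int) (i : Nat) :
    pvMask (x :: xs) i = (if i &&& 1 ≠ 0 then [x] else []) ++ pvMask xs (i / 2) := by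
  rw [pvMask_eq, pvMask_eq]
  rw [List.length_cons, List.range_succ_eq_map, List.filter_cons, List.filter_map]
  have hfc : List.filter ((fun j => decide (i &&& 1 <<< j ≠ 0)) ∘ Nat.succ) (List.range xs.length)
      = List.filter (fun j => decide (i / 2 &&& 1 <<< j ≠ 0)) (List.range xs.length) := by
    apply List.filter_congr
    intro j _
    simp [Function.comp, pv_bit_succ]
  rw [hfc]
  by_cases h : i % 2 = 1 <;>
    simp [h, Nat.and_one_is_mod, List.map_map, Function.comp_def]

theorem pvMask_zero (l : List Int) : pvMask l 0 = [] := by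
  simp [pvMask_eq]

theorem pv_range_two_mul (k : Nat) :
    List.range (2 * k) = (List.range k).flatMap (fun m => [2*m, 2*m+1]) := by
  induction k with
  | zero => simp
  | succ n ih => simp [List.range_succ, Nat.mul_succ, ih]

theorem pvM_cons (x : Int) (xs : List Int) :
    pvM (x :: xs) = (pvM xs).flatMap (fun s => [s, x :: s]) := by
  have hm0 : ∀ m : Nat, pvMask (x :: xs) (2*m) = pvMask xs m := by
    intro m
    have h0 : (2*m) &&& 1 = 0 := by rw [Nat.and_one_is_mod]; omega
    have e0 : 2*m/2 = m := by omega
    simp [pvMask_cons, h0, e0]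
  have hm1 : ∀ m : Nat, pvMask (x :: xs) (2*m+1) = x :: pvMask xs m := by
    intro m
    have h1 : (2*m+1) &&& 1 = 1 := by rw [Nat.and_one_is_mod]; omega
    have e1 : (2*m+1)/2 = m := by omega
    simp [pvMask_cons, h1, e1]
  unfold pvM
  rw [List.length_cons, pow_succ, Nat.mul_comm, pv_range_two_mul, List.map_flatMap,
      List.flatMap_map]
  simp only [List.map_cons, List.map_nil, hm0, hm1]

theorem pv_genSubsets_eq (l : List Int) :
    genSubsets l = ((List.range (2 ^ l.length)).drop 1).map (pvMask l) :=
  (PySem.List.foldl_append_singleton_eq_map (pvMask l) _ []).trans (List.nil_append _)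

theorem pvM_eq_cons (l : List Int) : pvM l = [] :: genSubsets l := by
  obtain ⟨m, hm⟩ : ∃ m, 2 ^ l.length = m + 1 :=
    ⟨2 ^ l.length - 1, by have := Nat.two_pow_pos l.length; omega⟩
  rw [pv_genSubsets_eq]
  unfold pvM
  rw [hm, List.range_succ_eq_map]
  simp [pvMask_zero]

theorem pv_nil_mem_M (l : List Int) : [] ∈ pvM l := by
  induction l with
  | nil => simp [pvM, pvMask]
  | cons x xs ih => simp only [pvM_cons, List.mem_flatMap]; exact ⟨[], ih, by simp⟩

theorem pv_singleton_mem_M (l : List Int) (y : Int) : [y] ∈ pvM l ↔ y ∈ l := by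
  induction l with
  | nil => simp [pvM, pvMask]
  | cons x xs ih =>
    simp only [pvM_cons, List.mem_flatMap, List.mem_cons]
    constructor
    · rintro ⟨s, hs, h⟩
      simp only [List.not_mem_nil, or_false] at h
      rcases h with h | h
      · exact Or.inr (ih.1 (h ▸ hs))
      · cases h; exact Or.inl rfl
    · rintro (rfl | hy)
      · exact ⟨[], pv_nil_mem_M xs, by simp⟩
      · exact ⟨[y], (ih.2 hy), by simp⟩

theorem pv_pair_mem_M (l : List Int) (u v : Int) :
    [u, v] ∈ pvM l ↔ (u, v) ∈ combinations2 l := by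
  induction l with
  | nil => simp [pvM, pvMask, combinations2]
  | cons x xs ih =>
    simp only [pvM_cons, List.mem_flatMap, combinations2, List.mem_append, List.mem_map]
    constructor
    · rintro ⟨s, hs, h⟩
      simp only [List.mem_cons, List.not_mem_nil, or_false] at h
      rcases h with h | h
      · exact Or.inr (ih.1 (h ▸ hs))
      · rw [List.cons.injEq] at h
        obtain ⟨rfl, rfl⟩ := h
        exact Or.inl ⟨v, (pv_singleton_mem_M xs v).1 hs, rfl⟩
    · rintro (⟨y, hy, h⟩ | h)
      · obtain ⟨rfl, rfl⟩ := Prod.mk.injEq .. ▸ (Prod.mk.inj h)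
        exact ⟨[v], (pv_singleton_mem_M xs v).2 hy, by simp⟩
      · exact ⟨[u, v], ih.2 h, by simp⟩

theorem pv_flagA (t : List (List (List Int))) (sel : List (List Int)) (init : Bool) :
    (t.foldl (fun flag sub => if sub.getD 0 [] ∈ sel ∧ sub.getD 1 [] ∈ sel then false else flag) init) = true
    ↔ (init = true ∧ ∀ sub ∈ t, ¬(sub.getD 0 [] ∈ sel ∧ sub.getD 1 [] ∈ sel)) := by
  induction t generalizing init with
  | nil => simp
  | cons s t ih =>
    rw [List.foldl_cons]
    by_cases h : s.getD 0 [] ∈ sel ∧ s.getD 1 [] ∈ sel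
    · rw [if_pos h, ih]
      constructor
      · rintro ⟨hfalse, _⟩; exact absurd hfalse (by simp)
      · rintro ⟨_, hall⟩; exact absurd h (hall s (by simp))
    · rw [if_neg h, ih]
      constructor
      · rintro ⟨hi, hall⟩
        refine ⟨hi, fun sub hs => ?_⟩
        rcases List.mem_cons.mp hs with rfl | hs
        · exact h
        · exact hall sub hs
      · rintro ⟨hi, hall⟩
        exact ⟨hi, fun sub hs => hall sub (List.mem_cons_of_mem _ hs)⟩

theorem pv_flagA_eq (t : List (List (List Int))) (sel : List (List Int)) (init : Bool) :
    t.foldl (fun flag sub => if sub.getD 0 [] ∈ sel ∧ sub.getD 1 [] ∈ sel then false else flag) init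
    = (init && !(t.any (fun sub => decide (sub.getD 0 [] ∈ sel ∧ sub.getD 1 [] ∈ sel)))) := by
  rw [Bool.eq_iff_iff, pv_flagA]
  simp

theorem pv_flagM (t : List (List Int)) (item : List (List Int)) (init : Bool) :
    (t.foldl (fun flag musts =>
        if item.length = 1 ∧ False then true
        else if musts ∈ item then true else flag) init) = true
    ↔ (init = true ∨ ∃ musts ∈ t, musts ∈ item) := by
  induction t generalizing init with
  | nil => simp
  | cons s t ih =>
    rw [List.foldl_cons]
    have hh : (if item.length = 1 ∧ False then true else if s ∈ item then true else init)
        = (if s ∈ item then true else init) := by simp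
    rw [hh]
    by_cases h : s ∈ item
    · rw [if_pos h, ih]
      constructor
      · intro _; exact Or.inr ⟨s, by simp, h⟩
      · intro _; exact Or.inl rfl
    · rw [if_neg h, ih]
      constructor
      · rintro (hi | ⟨m, hm, hmi⟩)
        · exact Or.inl hi
        · exact Or.inr ⟨m, List.mem_cons_of_mem _ hm, hmi⟩
      · rintro (hi | ⟨m, hm, hmi⟩)
        · exact Or.inl hi
        · rcases List.mem_cons.mp hm with rfl | hm
          · exact absurd hmi h
          · exact Or.inr ⟨m, hm, hmi⟩

theorem pv_flagM_eq (t : List (List Int)) (item : List (List Int)) (init : Bool) :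
    t.foldl (fun flag musts =>
        if item.length = 1 ∧ False then true
        else if musts ∈ item then true else flag) init
    = (init || t.any (fun musts => decide (musts ∈ item))) := by
  rw [Bool.eq_iff_iff, pv_flagM]
  simp [List.any_eq_true]

theorem pv_badside (cbt : List Int) (sel : List (List Int)) :
    (((genSubsets cbt).filter (fun x => x.length == 2)).map
        (fun row => row.map (fun item => [item]))).any
        (fun sub => decide (sub.getD 0 [] ∈ sel ∧ sub.getD 1 [] ∈ sel))
    = (combinations2 cbt).any (fun p => sel.contains [p.1] && sel.contains [p.2]) := by
  rw [Bool.eq_iff_iff]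
  simp only [List.any_eq_true, List.mem_map, List.mem_filter, decide_eq_true_eq, beq_iff_eq,
             Bool.and_eq_true, List.contains_iff_mem]
  constructor
  · rintro ⟨sub, ⟨s, ⟨hmem, hlen⟩, rfl⟩, h0, h1⟩
    obtain ⟨u, v, rfl⟩ := List.length_eq_two.mp hlen
    refine ⟨(u, v), ?_, by simpa using h0, by simpa using h1⟩
    exact (pv_pair_mem_M cbt u v).1 (pvM_eq_cons cbt ▸ List.mem_cons_of_mem _ hmem)
  · rintro ⟨⟨u, v⟩, hp, h0, h1⟩
    have hmm := (pv_pair_mem_M cbt u v).2 hp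
    rw [pvM_eq_cons] at hmm
    rcases List.mem_cons.mp hmm with h | h
    · simp at h
    · exact ⟨[[u], [v]], ⟨[u, v], ⟨h, by simp⟩, by simp⟩, by simpa using h0, by simpa using h1⟩

theorem pv_mustside (mh : List Int) (item : List (List Int)) :
    (mh.map (fun m => [m])).any (fun musts => decide (musts ∈ item))
    = mh.any (fun m => item.contains [m]) := by
  rw [Bool.eq_iff_iff]
  simp [List.any_eq_true]

-- ===== VERDICT (by name: the statement is the Claim_ definition above) =====
theorem applySplConditions_spec : Claim_equal_applySplConditions := by
  intro a cbt mh _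
  show applySplConditions a cbt mh = applySplConditions_alt a cbt mh
  simp only [applySplConditions, applySplConditions_alt,
             PySem.List.foldl_append_singleton_eq_map, List.nil_append,
             pv_flagA_eq, pv_flagM_eq, Bool.true_and, Bool.false_or,
             PySem.List.foldl_append_if, List.map_id']
  rw [List.filter_filter]
  apply List.filter_congr
  intro sel _
  rw [pv_badside, pv_mustside, Bool.and_comm]
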